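-- pv_equiv track=rewrite | github.com/christophelanternier/ImageClassificationChallenge | code/utils.py | parties
-- ===== SOURCE A (Python) =====
-- def parties(card, n):
--     ensemble = range(1, n+1)
--     parties = []
--
--     i = 0
--     i_max = 2**n
--
--     while i < i_max:
--         s = []
--         j = 0
--         j_max = n
--         while j < j_max:
--             if (i>>j)&1 == 1:
--                 s.append(j+1)
--             j += 1
--         if (len(s) == card):
--             parties.append(s)
--         i += 1
--     return parties
-- ===== SOURCE B (Python) =====
-- def parties(card, n):
--     # DP over 1..n: L[k] = size-k subsets of {1..m} in colex (bitmask) order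
--     if card < 0:
--         return []
--     if card > max(n, 0):
--         return []  # no subset of {1..n} has more than n elements
--     L = [[[]]] + [[] for _ in range(card)]
--     for m in range(1, n + 1):
--         for k in range(card, 0, -1):
--             L[k] = L[k] + [s + [m] for s in L[k - 1]]
--     return L[card]
-- ===== Notes on version B (the rewrite author's own statement) =====
-- stated objective: alternative
-- what changed: Replaces the scan of all 2^n bitmasks (building each subset bit by bit and filtering by size) with a dynamic program over m=1..n that keeps, for each size k<=card, the size-k subsets of {1..m} in colex order and extends them, so only actual combinations are ever built.
-- intended difference: For card = 0 and n <= -1075, A returns [] because Python's 2**n underflows to the float 0.0 so its loop never runs, while B returns [[]] — the empty set is the unique size-0 subset, the intended value. — e.g. on parties(0, -1075): A returns [], B returns [[]]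
import Mathlib
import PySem

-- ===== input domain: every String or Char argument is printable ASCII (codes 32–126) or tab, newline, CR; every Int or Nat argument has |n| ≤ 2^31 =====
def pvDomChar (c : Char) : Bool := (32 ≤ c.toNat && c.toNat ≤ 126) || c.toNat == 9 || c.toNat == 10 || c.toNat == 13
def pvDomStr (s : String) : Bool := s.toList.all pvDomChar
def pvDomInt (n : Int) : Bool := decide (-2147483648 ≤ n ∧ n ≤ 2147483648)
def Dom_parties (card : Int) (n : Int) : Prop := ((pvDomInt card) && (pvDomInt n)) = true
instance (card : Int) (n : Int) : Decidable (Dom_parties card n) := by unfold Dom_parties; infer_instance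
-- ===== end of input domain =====

-- B replaces A's scan of all 2^n bitmasks with a DP over m = 1..n keeping the size-k
-- subsets of {1..m} (k ≤ card) in colex order, so only real combinations are ever built;
-- return values proved equal outside D_parties (A's float-underflow corner).

-- ===== PORT A =====
-- inner while over j: build s from the bits of i ((i>>j)&1 as Nat shift/mod; exact: i ≥ 0 here)
def partiesBits (i : Nat) (jmax : Nat) : List Int :=
  (List.range jmax).foldl (fun s j => if (i >>> j) % 2 = 1 then s ++ [(j : Int) + 1] else s) []

-- outer while over i. Exact on n < 0 too: there Python's i_max = 2**n is a float; it is
-- positive (loop body runs exactly once, for i = 0) iff n ≥ -1074, and underflows to 0.0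
-- (loop body never runs) for n ≤ -1075.
def parties (card : Int) (n : Int) : List (List Int) :=
  (List.range (if 0 ≤ n then 2 ^ n.toNat else if -1074 ≤ n then 1 else 0)).foldl (fun acc i =>
    let s := partiesBits i n.toNat
    if (s.length : Int) = card then acc ++ [s] else acc) []

-- ===== PORT B =====
-- one pass of the inner `for k in range(card, 0, -1)` loop: every new L[k] reads only the
-- OLD L[k-1] (the descending order in Source B), so the update is written as one map over k
def partiesStep (c : Nat) (L : List (List (List Int))) (m : Int) : List (List (List Int)) :=
  (List.range (c + 1)).map (fun (k : Nat) =>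
    if k = 0 then L.getD 0 []
    else L.getD k [] ++ (L.getD (k - 1) []).map (fun s => s ++ [m]))

def parties_alt (card : Int) (n : Int) : List (List Int) :=
  if card < 0 then []
  else if card > max n 0 then []  -- no subset of {1..n} has more than n elements
  else
    let c := card.toNat
    let L := (List.range n.toNat).foldl
      (fun L (m0 : Nat) => partiesStep c L ((m0 : Int) + 1)) ([[[]]] ++ List.replicate c [])
    L.getD c []

-- ===== PRECONDITION & SPEC =====
-- On n ≤ -1075 with card = 0 Python's 2**n underflows to the float 0.0, so A's loop never
-- runs and A returns []; B returns [[]] (the empty set is the unique size-0 subset), the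
-- intended value — A's [] is an accident of float underflow.
def D_parties (card : Int) (n : Int) : Prop := card = 0 ∧ n ≤ -1075
instance (card : Int) (n : Int) : Decidable (D_parties card n) := by unfold D_parties; infer_instance
def Spec_parties (card : Int) (n : Int) (out : List (List Int)) : Prop := ¬ D_parties card n → out = parties_alt card n
def pvDiffWitness_parties : Int × Int := (0, -1075)
def pvDiffWitnessOut_parties : (List (List Int)) × (List (List Int)) := ([], [[]])
instance (card : Int) (n : Int) (out : List (List Int)) : Decidable (Spec_parties card n out) := by unfold Spec_parties; infer_instance

-- ===== CLAIM (what is proved, stated in full; the proofs are below) =====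
def Claim_unchanged_parties : Prop := ∀ (card : Int) (n : Int), Dom_parties card n → Spec_parties card n (parties card n)
def Claim_changed_parties : Prop := Dom_parties (pvDiffWitness_parties.1) (pvDiffWitness_parties.2) ∧ D_parties (pvDiffWitness_parties.1) (pvDiffWitness_parties.2) ∧ parties (pvDiffWitness_parties.1) (pvDiffWitness_parties.2) = pvDiffWitnessOut_parties.1 ∧ parties_alt (pvDiffWitness_parties.1) (pvDiffWitness_parties.2) = pvDiffWitnessOut_parties.2 ∧ pvDiffWitnessOut_parties.1 ≠ pvDiffWitnessOut_parties.2
def Claim_exact_parties : Prop := ∀ (card : Int) (n : Int), Dom_parties card n → D_parties card n → parties card n ≠ parties_alt card n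

-- ===== LEMMAS AND PROOFS =====

-- the common specification: size-c subsets of {1..m}, in colex (= bitmask) order
def colexZ : Int → Nat → List (List Int)
  | c, 0 => if c = 0 then [[]] else []
  | c, m + 1 => colexZ c m ++ (colexZ (c - 1) m).map (fun s => s ++ [(m : Int) + 1])

theorem colexZ_neg : ∀ (m : Nat) (c : Int), c < 0 → colexZ c m = [] := by
  intro m
  induction m with
  | zero => intro c hc; simp [colexZ]; omega
  | succ m ih => intro c hc; simp [colexZ, ih c hc, ih (c - 1) (by omega)]

-- A's filtered scan, as filter-then-map over the range of masks
def Aset (c : Int) (m : Nat) : List (List Int) :=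
  ((List.range (2 ^ m)).filter
      (fun i => decide (((partiesBits i m).length : Int) = c))).map (fun i => partiesBits i m)

theorem parties_eq_Aset (card n : Int) (hn : -1074 ≤ n) : parties card n = Aset card n.toNat := by
  unfold parties Aset
  have hiter : (if 0 ≤ n then 2 ^ n.toNat else if -1074 ≤ n then 1 else 0) = 2 ^ n.toNat := by
    by_cases h0 : 0 ≤ n
    · rw [if_pos h0]
    · rw [if_neg h0, if_pos hn]
      have : n.toNat = 0 := by omega
      rw [this, pow_zero]
  rw [hiter]
  rw [PySem.List.foldl_append_ite (p := fun i => ((partiesBits i n.toNat).length : Int) = card)]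
  simp

theorem bits_lt {m i : Nat} (h : i < 2 ^ m) : partiesBits i (m + 1) = partiesBits i m := by
  unfold partiesBits
  rw [List.range_succ, List.foldl_append]
  simp [Nat.shiftRight_eq_div_pow, Nat.div_eq_of_lt h]

theorem bits_add {m i : Nat} (h : i < 2 ^ m) :
    partiesBits (2 ^ m + i) (m + 1) = partiesBits i m ++ [(m : Int) + 1] := by
  unfold partiesBits
  rw [List.range_succ, List.foldl_append]
  have hstep : (List.range m).foldl
      (fun s j => if ((2 ^ m + i) >>> j) % 2 = 1 then s ++ [(j : Int) + 1] else s) [] =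
      (List.range m).foldl
      (fun s j => if (i >>> j) % 2 = 1 then s ++ [(j : Int) + 1] else s) [] := by
    apply PySem.List.foldl_congr_mem
    intro acc j hj
    have hjm : j < m := List.mem_range.mp hj
    have h1 : (2 ^ m + i) >>> j = 2 * 2 ^ (m - j - 1) + i >>> j := by
      have hm : 2 ^ m = 2 ^ j * (2 * 2 ^ (m - j - 1)) := by
        have h2 : 2 ^ j * (2 * 2 ^ (m - j - 1)) = 2 ^ (j + 1 + (m - j - 1)) := by
          rw [pow_add, pow_add, pow_one]; ring
        rw [h2]
        congr 1
        omega
      rw [Nat.shiftRight_eq_div_pow, Nat.shiftRight_eq_div_pow, hm,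
        Nat.mul_add_div (Nat.two_pow_pos j)]
    rw [h1]
    have : (2 * 2 ^ (m - j - 1) + i >>> j) % 2 = (i >>> j) % 2 := by omega
    rw [this]
  rw [hstep]
  have hm : ((2 ^ m + i) >>> m) % 2 = 1 := by
    rw [Nat.shiftRight_eq_div_pow, Nat.add_comm, Nat.add_div_right _ (Nat.two_pow_pos m),
      Nat.div_eq_of_lt h]
  simp [hm]

theorem Aset_succ (c : Int) (m : Nat) :
    Aset c (m + 1) = Aset c m ++ (Aset (c - 1) m).map (fun s => s ++ [(m : Int) + 1]) := by
  unfold Aset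
  have hsplit : List.range (2 ^ (m + 1)) =
      List.range (2 ^ m) ++ (List.range (2 ^ m)).map (2 ^ m + ·) := by
    rw [← List.range_add]; congr 1; ring
  rw [hsplit, List.filter_append, List.map_append]
  congr 1
  · -- first half: all masks there have bit m clear
    have hf : (List.range (2 ^ m)).filter
        (fun i => decide (((partiesBits i (m + 1)).length : Int) = c)) =
        (List.range (2 ^ m)).filter
        (fun i => decide (((partiesBits i m).length : Int) = c)) := by
      apply List.filter_congr
      intro i hi
      rw [bits_lt (List.mem_range.mp hi)]
    rw [hf]
    apply List.map_congr_left
    intro i hi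
    exact bits_lt (List.mem_range.mp (List.mem_of_mem_filter hi))
  · -- second half: masks with bit m set; lengths shift by one
    rw [List.filter_map, List.map_map]
    have hf : (List.range (2 ^ m)).filter
        ((fun i => decide (((partiesBits i (m + 1)).length : Int) = c)) ∘ (2 ^ m + ·)) =
        (List.range (2 ^ m)).filter
        (fun i => decide (((partiesBits i m).length : Int) = c - 1)) := by
      apply List.filter_congr
      intro i hi
      simp only [Function.comp, bits_add (List.mem_range.mp hi), List.length_append,
        List.length_cons, List.length_nil, decide_eq_decide]
      push_cast
      omega
    rw [hf, List.map_map]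
    apply List.map_congr_left
    intro i hi
    simp only [Function.comp]
    exact bits_add (List.mem_range.mp (List.mem_of_mem_filter hi))

theorem Aset_eq_colexZ : ∀ (m : Nat) (c : Int), Aset c m = colexZ c m := by
  intro m
  induction m with
  | zero =>
    intro c
    simp only [Aset, colexZ, pow_zero, List.range_one]
    by_cases hc : c = 0 <;> simp [partiesBits, hc, eq_comm]
  | succ m ih =>
    intro c
    rw [Aset_succ, colexZ, ih c, ih (c - 1)]

-- ----- B side -----

def TBL (c : Nat) (m : Nat) : List (List (List Int)) :=
  (List.range (c + 1)).map (fun (k : Nat) => colexZ (k : Int) m)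

theorem mapRange_getD {c m k : Nat} (h : k ≤ c) :
    (((List.range (c + 1)).map (fun (j : Nat) => colexZ (j : Int) m)).getD k []) = colexZ (k : Int) m := by
  rw [List.getD_eq_getElem?_getD, List.getElem?_map, List.getElem?_range (by omega)]
  rfl

theorem TBL_getD {c m k : Nat} (h : k ≤ c) : (TBL c m).getD k [] = colexZ (k : Int) m := by
  unfold TBL; exact mapRange_getD h

theorem TBL_zero (c : Nat) : [[[]]] ++ List.replicate c ([] : List (List Int)) = TBL c 0 := by
  unfold TBL
  rw [List.range_succ_eq_map, List.map_cons, List.map_map]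
  have hc : (List.range c).map ((fun (k : Nat) => colexZ (k : Int) 0) ∘ Nat.succ) =
      (List.range c).map (fun _ => ([] : List (List Int))) := by
    apply List.map_congr_left
    intro k hk
    simp only [Function.comp, colexZ]
    rw [if_neg (by omega)]
  rw [hc]
  simp [colexZ, List.map_const']

theorem TBL_step (c m : Nat) : partiesStep c (TBL c m) ((m : Int) + 1) = TBL c (m + 1) := by
  unfold partiesStep TBL
  apply List.map_congr_left
  intro k hk
  have hkc : k ≤ c := by have := List.mem_range.mp hk; omega
  by_cases hk0 : k = 0
  · subst hk0
    rw [if_pos rfl, mapRange_getD (by omega)]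
    show colexZ 0 m = colexZ ((0 : Nat) : Int) (m + 1)
    rw [colexZ]
    rw [colexZ_neg m (((0 : Nat) : Int) - 1) (by norm_num)]
    simp
  · rw [if_neg hk0, mapRange_getD hkc, mapRange_getD (by omega : k - 1 ≤ c)]
    show _ = colexZ (k : Int) (m + 1)
    rw [colexZ]
    have hcast : ((k - 1 : Nat) : Int) = (k : Int) - 1 := by omega
    rw [hcast]

theorem colexZ_gt : ∀ (m : Nat) (c : Int), (m : Int) < c → colexZ c m = [] := by
  intro m
  induction m with
  | zero => intro c hc; rw [colexZ, if_neg (by omega)]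
  | succ m ih =>
    intro c hc
    push_cast at hc
    rw [colexZ, ih c (by omega), ih (c - 1) (by omega)]
    simp

theorem parties_alt_eq (card n : Int) : parties_alt card n = colexZ card n.toNat := by
  unfold parties_alt
  by_cases hc : card < 0
  · rw [if_pos hc, colexZ_neg _ _ hc]
  · rw [if_neg hc]
    by_cases hbig : card > max n 0
    · rw [if_pos hbig, colexZ_gt n.toNat card (by omega)]
    rw [if_neg hbig]
    have htab : ∀ m : Nat, (List.range m).foldl
        (fun L (m0 : Nat) => partiesStep card.toNat L ((m0 : Int) + 1))
        ([[[]]] ++ List.replicate card.toNat []) = TBL card.toNat m := by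
      intro m
      induction m with
      | zero => simpa using TBL_zero card.toNat
      | succ m ih => rw [List.range_succ, List.foldl_append, ih, List.foldl_cons,
          List.foldl_nil, TBL_step]
    show ((List.range n.toNat).foldl
        (fun L (m0 : Nat) => partiesStep card.toNat L ((m0 : Int) + 1))
        ([[[]]] ++ List.replicate card.toNat [])).getD card.toNat [] = colexZ card n.toNat
    rw [htab n.toNat, TBL_getD (le_refl _), Int.toNat_of_nonneg (by omega)]

theorem parties_underflow (card n : Int) (hn : n ≤ -1075) : parties card n = [] := by
  unfold parties
  rw [if_neg (by omega), if_neg (by omega)]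
  simp

-- ===== VERDICT (by name: the statements are the Claim_ definitions above) =====
theorem parties_spec : Claim_unchanged_parties := by
  intro card n _
  unfold Spec_parties
  intro hD
  by_cases hn : -1074 ≤ n
  · rw [parties_eq_Aset card n hn, Aset_eq_colexZ, parties_alt_eq]
  · -- n ≤ -1075, so card ≠ 0 (¬ D_): both sides are []
    have hc : card ≠ 0 := fun h => hD ⟨h, by omega⟩
    rw [parties_underflow card n (by omega), parties_alt_eq]
    have hn0 : n.toNat = 0 := by omega
    rw [hn0, colexZ]
    rw [if_neg hc]

theorem parties_changed : Claim_changed_parties := by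
  unfold Claim_changed_parties
  refine ⟨by decide, by decide, ?_, ?_, by decide⟩
  · show parties 0 (-1075) = []
    exact parties_underflow 0 (-1075) (by norm_num)
  · show parties_alt 0 (-1075) = [[]]
    rw [parties_alt_eq]
    show colexZ 0 (-1075 : Int).toNat = [[]]
    rw [show ((-1075 : Int).toNat) = 0 from rfl, colexZ]
    simp

theorem parties_tight : Claim_exact_parties := by
  intro card n _ hD
  obtain ⟨hc, hn⟩ := hD
  rw [parties_underflow card n hn, parties_alt_eq, hc]
  have hn0 : n.toNat = 0 := by omega
  rw [hn0, colexZ]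
  simp
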